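-- pv_equiv track=rewrite | github.com/alMohimanul/PRISM | backend/apps/api/src/agents/literature_reviewer.py | _is_related_section
-- ===== SOURCE A (Python) =====
-- def _is_related_section(section: str, target_sections: set) -> bool:
--     """Check if a section is related to target sections.
--
--     Args:
--         section: Section to check
--         target_sections: Target sections
--
--     Returns:
--         True if related
--     """
--     # Define related section groups
--     related_groups = [
--         {"results", "experiments", "evaluation"},
--         {"methodology", "methods", "experiments"},
--         {"introduction", "background", "abstract"},
--         {"discussion", "conclusion", "results"},
--     ]
--
--     for group in related_groups:
--         if section in group and any(t in group for t in target_sections):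
--             return True
--
--     return False
-- ===== SOURCE B (Python) =====
-- _RELATED_GROUPS = [
--     ("results", "experiments", "evaluation"),
--     ("methodology", "methods", "experiments"),
--     ("introduction", "background", "abstract"),
--     ("discussion", "conclusion", "results"),
-- ]
--
-- # One-time adjacency index: keyword -> union of every group containing it.
-- _RELATED = {}
-- for _group in _RELATED_GROUPS:
--     for _kw in _group:
--         _RELATED.setdefault(_kw, set()).update(_group)
--
--
-- def _is_related_section(section: str, target_sections: set) -> bool:
--     """Check if a section is related to target sections (index lookup + one intersection)."""
--     return not _RELATED.get(section, set()).isdisjoint(target_sections)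
-- ===== Notes on version B (the rewrite author's own statement) =====
-- stated objective: simpler
-- what changed: Replaces the per-group loop with a nested any() over targets by a precomputed keyword-to-union-of-related-groups index built once at module load; the function body becomes a single dict lookup plus one set-disjointness test.
import Mathlib
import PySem

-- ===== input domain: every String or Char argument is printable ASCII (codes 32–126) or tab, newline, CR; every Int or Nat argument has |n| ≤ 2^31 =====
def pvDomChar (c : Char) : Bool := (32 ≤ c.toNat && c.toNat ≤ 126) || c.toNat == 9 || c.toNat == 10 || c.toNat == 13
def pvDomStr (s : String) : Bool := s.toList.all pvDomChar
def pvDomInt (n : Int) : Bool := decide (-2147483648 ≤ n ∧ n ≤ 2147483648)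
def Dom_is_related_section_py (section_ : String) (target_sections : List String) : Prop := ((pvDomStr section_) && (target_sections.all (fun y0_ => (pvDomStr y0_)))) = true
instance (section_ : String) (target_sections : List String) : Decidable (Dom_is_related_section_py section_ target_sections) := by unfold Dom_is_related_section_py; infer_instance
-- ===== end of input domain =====

-- B replaces the per-group loop + nested any() by a precomputed keyword->union-of-groups index and one disjointness test (objective: simpler per-call logic; return value only).
-- ===== PORT A =====
def relatedGroupsA : List (PySem.Set String) :=
  [PySem.Set.ofList ["results", "experiments", "evaluation"],
   PySem.Set.ofList ["methodology", "methods", "experiments"],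
   PySem.Set.ofList ["introduction", "background", "abstract"],
   PySem.Set.ofList ["discussion", "conclusion", "results"]]

def is_related_section_py (section_ : String) (target_sections : List String) : Bool :=
  relatedGroupsA.any (fun group =>
    PySem.Set.contains group section_ &&
    target_sections.any (fun t => PySem.Set.contains group t))

-- ===== PORT B =====
def relatedGroupsB : List (List String) :=
  [["results", "experiments", "evaluation"],
   ["methodology", "methods", "experiments"],
   ["introduction", "background", "abstract"],
   ["discussion", "conclusion", "results"]]

def relatedIdx : PySem.Dict String (PySem.Set String) :=
  relatedGroupsB.foldl
    (fun d group =>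
      group.foldl
        (fun d kw => d.insert kw (PySem.Set.update (d.getD kw PySem.Set.empty) group)) d)
    PySem.Dict.empty

def is_related_section_py_alt (section_ : String) (target_sections : List String) : Bool :=
  !(PySem.Set.isdisjoint (relatedIdx.getD section_ PySem.Set.empty) target_sections)

-- ===== PRECONDITION & SPEC =====
def Spec_is_related_section_py (section_ : String) (target_sections : List String) (out : Bool) : Prop := out = is_related_section_py_alt section_ target_sections
instance (section_ : String) (target_sections : List String) (out : Bool) : Decidable (Spec_is_related_section_py section_ target_sections out) := by unfold Spec_is_related_section_py; infer_instance

-- ===== CLAIM (what is proved, stated in full; the proofs are below) =====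
def Claim_equal_is_related_section_py : Prop := ∀ (section_ : String) (target_sections : List String), Dom_is_related_section_py section_ target_sections → Spec_is_related_section_py section_ target_sections (is_related_section_py section_ target_sections)

-- ===== LEMMAS AND PROOFS =====
-- The index, fully evaluated.
theorem relatedIdx_eq : relatedIdx = PySem.Dict.mk
    [("results", ["results", "experiments", "evaluation", "discussion", "conclusion"]),
     ("experiments", ["results", "experiments", "evaluation", "methodology", "methods"]),
     ("evaluation", ["results", "experiments", "evaluation"]),
     ("methodology", ["methodology", "methods", "experiments"]),
     ("methods", ["methodology", "methods", "experiments"]),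
     ("introduction", ["introduction", "background", "abstract"]),
     ("background", ["introduction", "background", "abstract"]),
     ("abstract", ["introduction", "background", "abstract"]),
     ("discussion", ["discussion", "conclusion", "results"]),
     ("conclusion", ["discussion", "conclusion", "results"])] := by decide

-- Index correctness: the stored union holds x iff some group holds both section_ and x.
theorem memIdx (sec x : String) :
    x ∈ relatedIdx.getD sec PySem.Set.empty ↔
      ∃ g ∈ relatedGroupsA, sec ∈ g ∧ x ∈ g := by
  by_cases h1 : sec = "results"
  · subst h1; rw [show relatedIdx.getD "results" PySem.Set.empty = ["results", "experiments", "evaluation", "discussion", "conclusion"] from by decide]; simp [relatedGroupsA, PySem.Set.ofList]; try tauto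
  by_cases h2 : sec = "experiments"
  · subst h2; rw [show relatedIdx.getD "experiments" PySem.Set.empty = ["results", "experiments", "evaluation", "methodology", "methods"] from by decide]; simp [relatedGroupsA, PySem.Set.ofList]; try tauto
  by_cases h3 : sec = "evaluation"
  · subst h3; rw [show relatedIdx.getD "evaluation" PySem.Set.empty = ["results", "experiments", "evaluation"] from by decide]; simp [relatedGroupsA, PySem.Set.ofList]; try tauto
  by_cases h4 : sec = "methodology"
  · subst h4; rw [show relatedIdx.getD "methodology" PySem.Set.empty = ["methodology", "methods", "experiments"] from by decide]; simp [relatedGroupsA, PySem.Set.ofList]; try tauto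
  by_cases h5 : sec = "methods"
  · subst h5; rw [show relatedIdx.getD "methods" PySem.Set.empty = ["methodology", "methods", "experiments"] from by decide]; simp [relatedGroupsA, PySem.Set.ofList]; try tauto
  by_cases h6 : sec = "introduction"
  · subst h6; rw [show relatedIdx.getD "introduction" PySem.Set.empty = ["introduction", "background", "abstract"] from by decide]; simp [relatedGroupsA, PySem.Set.ofList]; try tauto
  by_cases h7 : sec = "background"
  · subst h7; rw [show relatedIdx.getD "background" PySem.Set.empty = ["introduction", "background", "abstract"] from by decide]; simp [relatedGroupsA, PySem.Set.ofList]; try tauto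
  by_cases h8 : sec = "abstract"
  · subst h8; rw [show relatedIdx.getD "abstract" PySem.Set.empty = ["introduction", "background", "abstract"] from by decide]; simp [relatedGroupsA, PySem.Set.ofList]; try tauto
  by_cases h9 : sec = "discussion"
  · subst h9; rw [show relatedIdx.getD "discussion" PySem.Set.empty = ["discussion", "conclusion", "results"] from by decide]; simp [relatedGroupsA, PySem.Set.ofList]; try tauto
  by_cases h10 : sec = "conclusion"
  · subst h10; rw [show relatedIdx.getD "conclusion" PySem.Set.empty = ["discussion", "conclusion", "results"] from by decide]; simp [relatedGroupsA, PySem.Set.ofList]; try tauto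
  · rw [show relatedIdx.getD sec PySem.Set.empty = PySem.Dict.getD (PySem.Dict.mk
        [("results", ["results", "experiments", "evaluation", "discussion", "conclusion"]),
         ("experiments", ["results", "experiments", "evaluation", "methodology", "methods"]),
         ("evaluation", ["results", "experiments", "evaluation"]),
         ("methodology", ["methodology", "methods", "experiments"]),
         ("methods", ["methodology", "methods", "experiments"]),
         ("introduction", ["introduction", "background", "abstract"]),
         ("background", ["introduction", "background", "abstract"]),
         ("abstract", ["introduction", "background", "abstract"]),
         ("discussion", ["discussion", "conclusion", "results"]),
         ("conclusion", ["discussion", "conclusion", "results"])]) sec PySem.Set.empty from by rw [relatedIdx_eq]]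
    simp [PySem.Dict.getD_eq_get?_getD, PySem.Dict.get?_mk_cons, beq_iff_eq,
          Ne.symm h1, Ne.symm h2, Ne.symm h3, Ne.symm h4, Ne.symm h5, Ne.symm h6,
          Ne.symm h7, Ne.symm h8, Ne.symm h9, Ne.symm h10, relatedGroupsA, PySem.Set.ofList]
    tauto

-- ===== VERDICT (by name: the statement is the Claim_ definition above) =====
theorem is_related_section_py_spec : Claim_equal_is_related_section_py := by
  intro sec ts _
  unfold Spec_is_related_section_py
  rw [Bool.eq_iff_iff]
  unfold is_related_section_py is_related_section_py_alt
  simp only [List.any_eq_true, PySem.Set.contains_iff, Bool.and_eq_true,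
    Bool.not_eq_true', ← Bool.not_eq_true, PySem.Set.isdisjoint_iff]
  constructor
  · rintro ⟨g, hg, hsec, t, ht, htg⟩ hall
    exact hall t ((memIdx sec t).mpr ⟨g, hg, hsec, htg⟩) ht
  · intro h
    push Not at h
    obtain ⟨x, hxs, hxts⟩ := h
    obtain ⟨g, hg, hsec, hxg⟩ := (memIdx sec x).mp hxs
    exact ⟨g, hg, hsec, x, hxts, hxg⟩
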